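-- pv_equiv track=rewrite | github.com/lx240352716-ui/hfsm-agent-framework | scripts/tests/test_transitions.py | check_transition_targets
-- ===== SOURCE A (Python) =====
-- VALID_AGENTS = {'coordinator', 'combat', 'numerical', 'executor', 'l3_qa', 'l3_merge', 'l3_automation'}
--
-- def check_transition_targets(agent_name, data):
--     """检查所有 target/source 引用的 Agent 是否合法"""
--     errors = []
--
--     # 检查 can_handoff_to
--     for item in data.get('can_handoff_to', []):
--         target = item.get('target', '')
--         if target not in VALID_AGENTS:
--             errors.append(f'[{agent_name}] can_handoff_to 中目标 "{target}" 不在合法 Agent 列表中')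
--         if 'condition' not in item:
--             errors.append(f'[{agent_name}] can_handoff_to → {target} 缺少 condition 字段')
--
--     # 检查 can_escalate_to
--     for item in data.get('can_escalate_to', []):
--         target = item.get('target', '')
--         if target not in VALID_AGENTS:
--             errors.append(f'[{agent_name}] can_escalate_to 中目标 "{target}" 不在合法 Agent 列表中')
--
--     # 检查 can_receive_rejection_from / can_receive_escalation_from
--     for key in ['can_receive_rejection_from', 'can_receive_escalation_from']:
--         for item in data.get(key, []):
--             source = item.get('source', '')
--             if source not in VALID_AGENTS:
--                 errors.append(f'[{agent_name}] {key} 中来源 "{source}" 不在合法 Agent 列表中')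
--             if 'payload' not in item:
--                 errors.append(f'[{agent_name}] {key} → {source} 缺少 payload 字段')
--
--     # 检查 can_reject_to
--     for item in data.get('can_reject_to', []):
--         target = item.get('target', '')
--         if target not in VALID_AGENTS:
--             errors.append(f'[{agent_name}] can_reject_to 中目标 "{target}" 不在合法 Agent 列表中')
--
--     return errors
-- ===== SOURCE B (Python) =====
-- VALID_AGENTS = {'coordinator', 'combat', 'numerical', 'executor', 'l3_qa', 'l3_merge', 'l3_automation'}
--
-- # B is a two-stage pipeline: stage 1 flattens the heterogeneous config into a single list of
-- # homogeneous check records (key, label, ref, missing-required-field-or-None); stage 2 renders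
-- # each record into 0-2 error strings. A checks and formats in one interleaved pass per section.
--
-- _SECTIONS = (
--     ('can_handoff_to', 'target', '目标', 'condition'),
--     ('can_escalate_to', 'target', '目标', None),
--     ('can_receive_rejection_from', 'source', '来源', 'payload'),
--     ('can_receive_escalation_from', 'source', '来源', 'payload'),
--     ('can_reject_to', 'target', '目标', None),
-- )
--
-- def _records(data):
--     """Normalize: one homogeneous record per configured item, in section order."""
--     return [(key, label, item.get(field, ''),
--              req if req is not None and req not in item else None)
--             for key, field, label, req in _SECTIONS
--             for item in data.get(key, [])]
--
-- def check_transition_targets(agent_name, data):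
--     """检查所有 target/source 引用的 Agent 是否合法"""
--     errors = []
--     for key, label, ref, missing in _records(data):
--         if ref not in VALID_AGENTS:
--             errors.append(f'[{agent_name}] {key} 中{label} "{ref}" 不在合法 Agent 列表中')
--         if missing is not None:
--             errors.append(f'[{agent_name}] {key} → {ref} 缺少 {missing} 字段')
--     return errors
-- ===== Notes on version B (the rewrite author's own statement) =====
-- stated objective: alternative
-- what changed: B is a two-stage pipeline: it first normalizes the heterogeneous config into a flat list of homogeneous check records (key, label, ref, missing-required-field-or-None) via a comprehension over section descriptors, then a separate rendering pass turns each record into error strings; A checks and formats in one interleaved pass per hardcoded section.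
import Mathlib
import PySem

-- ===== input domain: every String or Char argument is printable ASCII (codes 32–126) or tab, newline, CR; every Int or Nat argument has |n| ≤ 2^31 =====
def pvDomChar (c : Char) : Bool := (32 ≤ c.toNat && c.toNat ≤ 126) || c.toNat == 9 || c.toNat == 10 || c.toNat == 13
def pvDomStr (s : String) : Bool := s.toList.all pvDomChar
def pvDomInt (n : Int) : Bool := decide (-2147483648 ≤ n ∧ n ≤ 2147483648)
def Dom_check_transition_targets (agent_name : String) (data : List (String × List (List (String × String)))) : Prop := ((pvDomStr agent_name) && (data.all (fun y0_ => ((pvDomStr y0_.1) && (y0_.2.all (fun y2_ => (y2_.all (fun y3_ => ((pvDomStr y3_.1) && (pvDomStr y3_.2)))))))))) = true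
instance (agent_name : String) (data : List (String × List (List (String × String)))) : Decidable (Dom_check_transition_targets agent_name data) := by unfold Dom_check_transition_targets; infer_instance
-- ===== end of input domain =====

-- B replaces A's interleaved check-and-format section loops by a two-stage pipeline
-- (normalize the config into flat homogeneous records, then render each record into
-- error strings); objective: alternative decomposition, return value only (no mutation).

-- shared dict primitives (Python dict.get with default / 'in' on an association-list dict, first match)
def pvGetD {α : Type} (d : List (String × α)) (k : String) (dflt : α) : α :=
  match d.find? (fun p => p.1 == k) with
  | some p => p.2
  | none => dflt

def pvHasKey {α : Type} (d : List (String × α)) (k : String) : Bool :=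
  d.any (fun p => p.1 == k)

-- membership in VALID_AGENTS
def pvValid (s : String) : Bool :=
  s == "coordinator" || s == "combat" || s == "numerical" || s == "executor" ||
  s == "l3_qa" || s == "l3_merge" || s == "l3_automation"

-- ===== PORT A =====
def check_transition_targets (agent_name : String) (data : List (String × List (List (String × String)))) : List String :=
  let errors : List String := []
  -- can_handoff_to
  let errors := (pvGetD data "can_handoff_to" []).foldl (fun errors item =>
    let target := pvGetD item "target" ""
    let errors := if !pvValid target then
        errors ++ ["[" ++ agent_name ++ "] can_handoff_to 中目标 \"" ++ target ++ "\" 不在合法 Agent 列表中"]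
      else errors
    if !pvHasKey item "condition" then
      errors ++ ["[" ++ agent_name ++ "] can_handoff_to → " ++ target ++ " 缺少 condition 字段"]
    else errors) errors
  -- can_escalate_to
  let errors := (pvGetD data "can_escalate_to" []).foldl (fun errors item =>
    let target := pvGetD item "target" ""
    if !pvValid target then
      errors ++ ["[" ++ agent_name ++ "] can_escalate_to 中目标 \"" ++ target ++ "\" 不在合法 Agent 列表中"]
    else errors) errors
  -- can_receive_rejection_from / can_receive_escalation_from
  let errors := ["can_receive_rejection_from", "can_receive_escalation_from"].foldl (fun errors key =>
    (pvGetD data key []).foldl (fun errors item =>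
      let source := pvGetD item "source" ""
      let errors := if !pvValid source then
          errors ++ ["[" ++ agent_name ++ "] " ++ key ++ " 中来源 \"" ++ source ++ "\" 不在合法 Agent 列表中"]
        else errors
      if !pvHasKey item "payload" then
        errors ++ ["[" ++ agent_name ++ "] " ++ key ++ " → " ++ source ++ " 缺少 payload 字段"]
      else errors) errors) errors
  -- can_reject_to
  let errors := (pvGetD data "can_reject_to" []).foldl (fun errors item =>
    let target := pvGetD item "target" ""
    if !pvValid target then
      errors ++ ["[" ++ agent_name ++ "] can_reject_to 中目标 \"" ++ target ++ "\" 不在合法 Agent 列表中"]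
    else errors) errors
  errors

-- ===== PORT B =====
-- section descriptors feeding the normalization stage: (key, field, label, required field or none)
def pvSections : List (String × String × String × Option String) :=
  [("can_handoff_to", "target", "目标", some "condition"),
   ("can_escalate_to", "target", "目标", none),
   ("can_receive_rejection_from", "source", "来源", some "payload"),
   ("can_receive_escalation_from", "source", "来源", some "payload"),
   ("can_reject_to", "target", "目标", none)]

-- stage 1: one homogeneous record (key, label, ref, missing-required-field?) per configured item
def pvRecords (data : List (String × List (List (String × String)))) : List (String × String × String × Option String) :=
  pvSections.flatMap (fun sec =>
    (pvGetD data sec.1 []).map (fun item =>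
      (sec.1, sec.2.2.1, pvGetD item sec.2.1 "",
        match sec.2.2.2 with
        | some r => if !pvHasKey item r then some r else none
        | none => none)))

-- stage 2: render each record into 0–2 error strings
def check_transition_targets_alt (agent_name : String) (data : List (String × List (List (String × String)))) : List String :=
  (pvRecords data).foldl (fun errors rec =>
    let errors := if !pvValid rec.2.2.1 then
        errors ++ ["[" ++ agent_name ++ "] " ++ rec.1 ++ " 中" ++ rec.2.1 ++ " \"" ++ rec.2.2.1 ++ "\" 不在合法 Agent 列表中"]
      else errors
    match rec.2.2.2 with
    | some m => errors ++ ["[" ++ agent_name ++ "] " ++ rec.1 ++ " → " ++ rec.2.2.1 ++ " 缺少 " ++ m ++ " 字段"]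
    | none => errors) []

-- ===== PRECONDITION & SPEC =====
def Spec_check_transition_targets (agent_name : String) (data : List (String × List (List (String × String)))) (out : List String) : Prop := out = check_transition_targets_alt agent_name data
instance (agent_name : String) (data : List (String × List (List (String × String)))) (out : List String) : Decidable (Spec_check_transition_targets agent_name data out) := by unfold Spec_check_transition_targets; infer_instance

-- ===== CLAIM (what is proved, stated in full; the proofs are below) =====
def Claim_equal_check_transition_targets : Prop := ∀ (agent_name : String) (data : List (String × List (List (String × String)))), Dom_check_transition_targets agent_name data → Spec_check_transition_targets agent_name data (check_transition_targets agent_name data)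

-- ===== LEMMAS AND PROOFS =====

-- 'if p then e ++ x else e' pushed into an appended conditional list
theorem pv_if_append {p : Bool} {e x : List String} :
    (if p then e ++ x else e) = e ++ (if p then x else []) := by
  cases p <;> simp

-- 'match o with some m => e ++ g m | none => e' pushed into an appended list
theorem pv_match_append {o : Option String} {e : List String} {g : String → List String} :
    (match o with | some m => e ++ g m | none => e)
      = e ++ (match o with | some m => g m | none => []) := by
  cases o <;> simp

-- an accumulator loop appending a per-item list, as a flatMap
theorem pv_foldl_append {α : Type} (l : List α) (g : α → List String) (acc : List String) :
    l.foldl (fun e it => e ++ g it) acc = acc ++ l.flatMap g := by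
  induction l generalizing acc with
  | nil => simp
  | cons h t ih => rw [List.foldl_cons, List.flatMap_cons, ih]; simp

theorem check_transition_targets_spec : Claim_equal_check_transition_targets := by
  intro agent_name data _
  unfold Spec_check_transition_targets check_transition_targets check_transition_targets_alt pvRecords
  simp only [pvSections, List.flatMap_cons, List.flatMap_nil, List.append_nil, List.foldl,
    pv_if_append, pv_match_append]
  rw [List.foldl_append, List.foldl_append, List.foldl_append, List.foldl_append]
  simp only [List.foldl_map]
  simp only [show ∀ (l : List (List (String × String))) (g : List (String × String) → List String)
      (acc : List String), l.foldl (fun e it => e ++ g it) acc = acc ++ l.flatMap g from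
      fun l g acc => pv_foldl_append l g acc]
  simp only [pv_foldl_append, List.append_assoc, List.nil_append]
  have hm : ∀ (b : Bool) (r : String) (f : String → List String),
      (match (if b then some r else none) with | some m => f m | none => ([] : List String))
        = if b then f r else [] := by
    intro b r f; cases b <;> simp
  simp only [hm]
  simp [String.append_assoc]
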